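-- pv_equiv track=rewrite | github.com/nicoceron/co-acc | etl/src/coacc_etl/source_qualification.py | _has_id_marker
-- ===== SOURCE A (Python) =====
-- def _has_id_marker(norm_col: str) -> bool:
--     return (
--         norm_col == "id"
--         or norm_col.startswith("id_")
--         or norm_col.endswith("_id")
--         or "_id_" in norm_col
--         or any(
--             token in norm_col
--             for token in (
--                 "codigo",
--                 "c_digo",
--                 "cod",
--                 "numero",
--                 "n_mero",
--                 "identificador",
--                 "reference",
--                 "referencia",
--             )
--         )
--     )
-- ===== SOURCE B (Python) =====
-- _ID_SUBSTRING_MARKERS = (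
--     "codigo",
--     "c_digo",
--     "cod",
--     "numero",
--     "n_mero",
--     "identificador",
--     "reference",
--     "referencia",
-- )
--
--
-- def _has_id_marker(norm_col: str) -> bool:
--     # Explicit index scan: look for an occurrence of "id" whose left side is
--     # the string start or '_' and whose right side is the string end or '_';
--     # the remaining markers are plain substring tests.
--     n = len(norm_col)
--     for i in range(n - 1):
--         if (
--             norm_col[i] == "i"
--             and norm_col[i + 1] == "d"
--             and (i == 0 or norm_col[i - 1] == "_")
--             and (i + 2 == n or norm_col[i + 2] == "_")
--         ):
--             return True
--     return any(t in norm_col for t in _ID_SUBSTRING_MARKERS)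
-- ===== Notes on version B (the rewrite author's own statement) =====
-- stated objective: alternative
-- what changed: A's four library boundary checks for the 'id' token (equality, startswith 'id_', endswith '_id', contains '_id_') are replaced by one explicit index scan over the string that looks for an occurrence of 'id' delimited on each side by '_' or the string edge; the remaining markers stay substring tests.
import Mathlib
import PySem

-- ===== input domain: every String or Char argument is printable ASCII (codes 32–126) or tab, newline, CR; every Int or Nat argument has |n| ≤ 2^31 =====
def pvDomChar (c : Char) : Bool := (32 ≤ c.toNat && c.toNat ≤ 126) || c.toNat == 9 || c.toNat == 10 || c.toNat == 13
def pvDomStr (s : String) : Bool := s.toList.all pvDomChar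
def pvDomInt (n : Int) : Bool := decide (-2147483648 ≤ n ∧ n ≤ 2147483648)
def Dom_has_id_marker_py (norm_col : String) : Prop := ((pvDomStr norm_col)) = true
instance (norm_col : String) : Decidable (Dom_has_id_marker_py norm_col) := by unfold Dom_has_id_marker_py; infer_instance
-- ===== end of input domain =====

-- B replaces A's four library boundary checks for the 'id' token by one explicit
-- index scan over the string with left/right boundary tests; same value everywhere.

-- ===== PORT A =====
def has_id_marker_py (norm_col : String) : Bool :=
  norm_col == "id"
    || PySem.Str.startswith norm_col "id_"
    || PySem.Str.endswith norm_col "_id"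
    || PySem.Str.isIn "_id_" norm_col
    || ["codigo", "c_digo", "cod", "numero", "n_mero", "identificador",
        "reference", "referencia"].any (fun token => PySem.Str.isIn token norm_col)

-- ===== PORT B =====
-- the for-loop over range(n-1) with early return becomes List.any over List.range (n-1);
-- norm_col[k] for the in-range nonnegative k of the scan is cs[k]?
def has_id_marker_py_alt (norm_col : String) : Bool :=
  let cs := norm_col.toList
  let n := cs.length
  (List.range (n - 1)).any (fun i =>
      cs[i]? == some 'i' && cs[i + 1]? == some 'd'
        && (i == 0 || cs[i - 1]? == some '_')
        && (i + 2 == n || cs[i + 2]? == some '_'))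
    || ["codigo", "c_digo", "cod", "numero", "n_mero", "identificador",
        "reference", "referencia"].any (fun t => PySem.Str.isIn t norm_col)

-- ===== PRECONDITION & SPEC =====
def Spec_has_id_marker_py (norm_col : String) (out : Bool) : Prop := out = has_id_marker_py_alt norm_col
instance (norm_col : String) (out : Bool) : Decidable (Spec_has_id_marker_py norm_col out) := by unfold Spec_has_id_marker_py; infer_instance

-- ===== CLAIM (what is proved, stated in full; the proofs are below) =====
def Claim_equal_has_id_marker_py : Prop := ∀ (norm_col : String), Dom_has_id_marker_py norm_col → Spec_has_id_marker_py norm_col (has_id_marker_py norm_col)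

-- ===== LEMMAS AND PROOFS =====

-- (c :: rest) is a prefix of (cs.drop j) iff cs[j]? = c and the rest follows at j+1
theorem pv_cons_prefix_drop (c : Char) (rest cs : List Char) (j : Nat) :
    (c :: rest) <+: cs.drop j ↔ cs[j]? = some c ∧ rest <+: cs.drop (j + 1) := by
  have hget : cs[j]? = (cs.drop j)[0]? := by simp
  have htail : cs.drop (j + 1) = (cs.drop j).drop 1 := by rw [List.drop_drop]
  rw [hget, htail]
  cases cs.drop j with
  | nil => simp
  | cons a t => simp [List.cons_prefix_cons, eq_comm]

theorem pv_prefix3 (a b c : Char) (cs : List Char) (j : Nat) :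
    [a, b, c] <+: cs.drop j ↔ cs[j]? = some a ∧ cs[j + 1]? = some b ∧ cs[j + 2]? = some c := by
  simp [pv_cons_prefix_drop]

theorem pv_prefix4 (a b c d : Char) (cs : List Char) (j : Nat) :
    [a, b, c, d] <+: cs.drop j ↔
      cs[j]? = some a ∧ cs[j + 1]? = some b ∧ cs[j + 2]? = some c ∧ cs[j + 3]? = some d := by
  simp [pv_cons_prefix_drop]

-- suffix as a prefix of the final drop
theorem pv_suffix_iff (sub cs : List Char) :
    sub <:+ cs ↔ sub.length ≤ cs.length ∧ sub <+: cs.drop (cs.length - sub.length) := by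
  constructor
  · rintro ⟨t, rfl⟩
    refine ⟨by simp, ?_⟩
    have e : (t ++ sub).length - sub.length = t.length := by simp
    rw [e, List.drop_left]
  · rintro ⟨h, hp⟩
    have hlen : (cs.drop (cs.length - sub.length)).length = sub.length := by
      simp; omega
    have heq : sub = cs.drop (cs.length - sub.length) :=
      hp.eq_of_length (by omega)
    rw [heq]
    exact List.drop_suffix _ _

-- infix as prefix of some drop (via the PySem isIn bridge)
theorem pv_infix_iff (sub cs : List Char) :
    sub <:+: cs ↔ ∃ j, sub <+: cs.drop j := by
  rw [← PySem.Chars.isIn_iff_infix, ← PySem.Chars.exists_prefix_drop_iff_isIn]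

-- equality with a 2-element literal as length + prefix
theorem pv_eq_two (a b : Char) (cs : List Char) :
    cs = [a, b] ↔ cs.length = 2 ∧ cs[0]? = some a ∧ cs[1]? = some b := by
  constructor
  · rintro rfl; simp
  · rintro ⟨hl, h0, h1⟩
    apply List.ext_getElem?
    intro i
    match i with
    | 0 => simpa using h0
    | 1 => simpa using h1
    | (k + 2) =>
      rw [List.getElem?_eq_none (by omega), List.getElem?_eq_none (by simp)]

-- the core equivalence: A's four boundary checks = B's index-scan condition
theorem pv_key (cs : List Char) :
    (cs = ['i', 'd'] ∨ ['i', 'd', '_'] <+: cs ∨ ['_', 'i', 'd'] <:+ cs ∨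
        ['_', 'i', 'd', '_'] <:+: cs) ↔
      ∃ i, i < cs.length - 1 ∧ cs[i]? = some 'i' ∧ cs[i + 1]? = some 'd' ∧
        (i = 0 ∨ cs[i - 1]? = some '_') ∧ (i + 2 = cs.length ∨ cs[i + 2]? = some '_') := by
  have p3 := pv_prefix3 'i' 'd' '_' cs 0
  rw [List.drop_zero] at p3
  have psuf : ['_', 'i', 'd'] <:+ cs ↔ 3 ≤ cs.length ∧ cs[cs.length - 3]? = some '_' ∧
      cs[cs.length - 3 + 1]? = some 'i' ∧ cs[cs.length - 3 + 2]? = some 'd' := by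
    rw [pv_suffix_iff]
    simp [pv_prefix3]
  have pinf : ['_', 'i', 'd', '_'] <:+: cs ↔ ∃ j, cs[j]? = some '_' ∧ cs[j + 1]? = some 'i' ∧
      cs[j + 2]? = some 'd' ∧ cs[j + 3]? = some '_' := by
    rw [pv_infix_iff]
    simp only [pv_prefix4]
  rw [pv_eq_two, p3, psuf, pinf]
  constructor
  · rintro (⟨hl, h0, h1⟩ | ⟨h0, h1, h2⟩ | ⟨h3, h0, h1, h2⟩ | ⟨j, h0, h1, h2, h3⟩)
    · exact ⟨0, by omega, h0, h1, Or.inl rfl, Or.inl (by omega)⟩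
    · obtain ⟨hlt, -⟩ := List.getElem?_eq_some_iff.mp h2
      exact ⟨0, by omega, h0, h1, Or.inl rfl, Or.inr h2⟩
    · refine ⟨cs.length - 2, by omega, ?_, ?_, Or.inr ?_, Or.inl (by omega)⟩
      · rw [show cs.length - 2 = cs.length - 3 + 1 by omega]; exact h1
      · rw [show cs.length - 2 + 1 = cs.length - 3 + 2 by omega]; exact h2
      · rw [show cs.length - 2 - 1 = cs.length - 3 by omega]; exact h0
    · obtain ⟨hlt, -⟩ := List.getElem?_eq_some_iff.mp h2
      refine ⟨j + 1, by omega, h1, ?_, Or.inr (by simpa using h0), Or.inr ?_⟩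
      · rw [show j + 1 + 1 = j + 2 by omega]; exact h2
      · rw [show j + 1 + 2 = j + 3 by omega]; exact h3
  · rintro ⟨i, hi, h1, h2, hl | hl, hr | hr⟩
    · subst hl
      exact Or.inl ⟨by omega, h1, h2⟩
    · subst hl
      exact Or.inr (Or.inl ⟨h1, h2, hr⟩)
    · have hi1 : 1 ≤ i := by
        rcases Nat.eq_zero_or_pos i with rfl | hp
        · norm_num at hl; rw [h1] at hl; cases hl
        · exact hp
      refine Or.inr (Or.inr (Or.inl ⟨by omega, ?_, ?_, ?_⟩))
      · rw [show cs.length - 3 = i - 1 by omega]; exact hl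
      · rw [show cs.length - 3 + 1 = i by omega]; exact h1
      · rw [show cs.length - 3 + 2 = i + 1 by omega]; exact h2
    · have hi1 : 1 ≤ i := by
        rcases Nat.eq_zero_or_pos i with rfl | hp
        · norm_num at hl; rw [h1] at hl; cases hl
        · exact hp
      refine Or.inr (Or.inr (Or.inr ⟨i - 1, hl, ?_, ?_, ?_⟩))
      · rw [show i - 1 + 1 = i by omega]; exact h1
      · rw [show i - 1 + 2 = i + 1 by omega]; exact h2
      · rw [show i - 1 + 3 = i + 2 by omega]; exact hr

-- ===== VERDICT (by name: the statement is the Claim_ definition above) =====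
theorem has_id_marker_py_spec : Claim_equal_has_id_marker_py := by
  intro s _
  unfold Spec_has_id_marker_py has_id_marker_py has_id_marker_py_alt
  congr 1
  rw [Bool.eq_iff_iff]
  have hs : s = "id" ↔ s.toList = ['i', 'd'] := by rw [← String.toList_inj]; rfl
  simp only [Bool.or_eq_true, beq_iff_eq, PySem.Str.startswith_eq, PySem.Str.endswith_eq,
    PySem.Str.isIn_eq, PySem.Chars.startswith_iff, PySem.Chars.endswith_iff,
    PySem.Chars.isIn_iff_infix, hs, List.any_eq_true, List.mem_range, Bool.and_eq_true]
  have hp : "id_".toList = ['i', 'd', '_'] := rfl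
  have hsuf : "_id".toList = ['_', 'i', 'd'] := rfl
  have hinf : "_id_".toList = ['_', 'i', 'd', '_'] := rfl
  rw [hp, hsuf, hinf]
  constructor
  · intro h'
    obtain ⟨i, hi, h1, h2, h3, h4⟩ := (pv_key s.toList).mp (by tauto)
    exact ⟨i, hi, ⟨⟨h1, h2⟩, by simpa using h3⟩, by simpa using h4⟩
  · rintro ⟨i, hi, ⟨⟨h1, h2⟩, h3⟩, h4⟩
    have := (pv_key s.toList).mpr ⟨i, hi, h1, h2, by simpa using h3, by simpa using h4⟩
    tauto
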